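-- pv_equiv track=rewrite | github.com/attilathedud/inform_mapper | src/inform_mapper/inform_text.py | decode_z_word
-- ===== SOURCE A (Python) =====
-- ALPHABET_DICT = {0: " ", 1: "", 2: "", 3: "", 4: "", 5: "", 6: "a", 7: "b", 8: "c", 9: "d", 10: "e",
--                  11: "f", 12: "g", 13: "h", 14: "i", 15: "j", 16: "k", 17: "l", 18: "m", 19: "n",
--                  20: "o", 21: "p", 22: "q", 23: "r", 24: "s", 25: "t", 26: "u", 27: "v",
--                  28: "w", 29: "x", 30: "y", 31: "z"}
--
-- SHIFT_DICT = {0: " ", 1: "", 2: "", 3: "", 4: "", 5: "", 6: "", 7: "", 8: "0", 9: "1", 10: "2",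
--               11: "3", 12: "4", 13: "5", 14: "6", 15: "7", 16: "8", 17: "9", 18: ".", 19: ",",
--               20: "!", 21: "?", 22: "_", 23: "#", 24: "'", 25: "\"", 26: "/", 27: "\\",
--               28: "-", 29: ":", 30: "(", 31: ")"}
--
-- def decode_z_bytes_into_z_chars(z_bytes):
--     """
--     z bytes are grouped in 16 bit segments (words) that contain 3 z characters and 1 end of word
--     bit. Since a z string can have any amount of z characters, this function creates a stream of
--     each word's z characters.
--     """
--     binary_representation = bin(int(z_bytes, 16))[2:].zfill(16)
--
--     is_end_byte = binary_representation[0]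
--
--     return (is_end_byte, [binary_representation[1:6], binary_representation[6:11],
--                           binary_representation[11:16]])
--
-- def decode_z_word(z_bytes):
--     """Given an array of bytes, decode the z word."""
--     word = ""
--     is_end_byte = False
--     shift_code = 0
--
--     if len(z_bytes) % 2 != 0:
--         return word
--
--     # Loop through the byte stream and assemble all the character bits.
--     word_binary_stream = []
--     for i in range(0, len(z_bytes), 4):
--         (is_end_byte, temp_binary) = decode_z_bytes_into_z_chars(
--             z_bytes[i:i + 4])
--         word_binary_stream += temp_binary
--
--         if is_end_byte is True:
--             break
--
--     i = 0
--
--     # Loop through all the character bits and encode them according to the z-engine rules.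
--     while i < len(word_binary_stream):
--         temp_code = int(word_binary_stream[i], 2)
--
--         if temp_code == 4 or temp_code == 5:
--             shift_code = temp_code
--         else:
--             if shift_code == 4:
--                 word += ALPHABET_DICT[temp_code].upper()
--             elif shift_code == 5:
--                 if temp_code == 6:
--                     word += chr(int(word_binary_stream[i + 1] +
--                                     word_binary_stream[i + 2], 2))
--                     i += 2
--                 else:
--                     word += SHIFT_DICT[temp_code]
--             else:
--                 word += ALPHABET_DICT[temp_code]
--
--             shift_code = 0
--
--         i += 1
--
--     return word
-- ===== SOURCE B (Python) =====
-- def decode_z_word(z_bytes):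
--     """Given an array of bytes, decode the z word."""
--     if len(z_bytes) % 2 != 0:
--         return ""
--
--     out = []
--     state = 0   # 0 = plain, 4/5 = pending shift, 6 = awaiting ZSCII high bits, 7 = awaiting ZSCII low bits
--     pending = 0
--     for i in range(0, len(z_bytes), 4):
--         w = int(z_bytes[i:i + 4], 16)
--         for code in (w // 1024 % 32, w // 32 % 32, w % 32):
--             if state == 6:
--                 pending = code
--                 state = 7
--             elif state == 7:
--                 out.append(chr(pending * 32 + code))
--                 state = 0
--             elif code == 4 or code == 5:
--                 state = code
--             elif state == 5 and code == 6:
--                 state = 6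
--             else:
--                 if state == 5:
--                     if code == 0:
--                         out.append(" ")
--                     elif code >= 18:
--                         out.append(".,!?_#'\"/\\-:()"[code - 18])
--                     elif code >= 8:
--                         out.append(chr(ord("0") + code - 8))
--                 elif code == 0:
--                     out.append(" ")
--                 elif code >= 6:
--                     c = chr(ord("a") + code - 6)
--                     out.append(c.upper() if state == 4 else c)
--                 state = 0
--     return "".join(out)
-- ===== Notes on version B (the rewrite author's own statement) =====
-- stated objective: alternative
-- what changed: A converts each 16-bit chunk to a zero-padded binary string, collects all 5-bit substrings into a list, then decodes them in a second index-skipping while loop with dict lookups; B makes a single pass, extracting the three 5-bit codes per chunk with shift/mask arithmetic and feeding them straight into a small state machine (states for pending shift and the two ZSCII payload codes) that computes characters arithmetically instead of via dicts and binary strings.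
-- outside the precondition, e.g. on decode_z_word(' 12 '): A returns '  m', B returns '  m'; on decode_z_word('1_2f'): A returns ' dj', B returns ' dj'
import Mathlib
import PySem

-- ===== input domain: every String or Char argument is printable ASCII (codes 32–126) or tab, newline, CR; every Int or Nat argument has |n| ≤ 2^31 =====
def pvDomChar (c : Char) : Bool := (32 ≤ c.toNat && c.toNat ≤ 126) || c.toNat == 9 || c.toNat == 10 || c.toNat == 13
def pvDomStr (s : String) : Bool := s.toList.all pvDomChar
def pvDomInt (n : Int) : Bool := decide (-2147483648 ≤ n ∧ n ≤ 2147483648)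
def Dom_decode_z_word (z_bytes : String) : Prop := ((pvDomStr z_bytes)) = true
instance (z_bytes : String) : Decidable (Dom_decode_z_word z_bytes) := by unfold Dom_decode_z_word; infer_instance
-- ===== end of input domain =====

-- B replaces A's two sequential passes (hex → 16-bit binary string → list of 5-bit substrings,
-- then a second index-skipping while loop over those substrings) by a single streaming state
-- machine over arithmetically extracted 5-bit codes; same return value on Pre_.

-- ===== PORT A =====

-- shared port of Python's int(s, 16) on hex-digit strings (ValueError inputs are outside Pre_)
def pvHexVal (c : Char) : Int :=
  if c.toNat ≤ 57 then (c.toNat : Int) - 48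
  else if c.toNat ≤ 70 then (c.toNat : Int) - 55
  else (c.toNat : Int) - 87

def pvIntOfHexL (l : List Char) : Int := l.foldl (fun a c => 16 * a + pvHexVal c) 0

-- hand port of Python's bin(n)[2:] for n ≥ 0 (minimal binary digits, MSB first; exact there)
def pvBin (n : Nat) : List Char :=
  if n < 2 then [if n = 1 then '1' else '0']
  else pvBin (n / 2) ++ [if n % 2 = 1 then '1' else '0']
decreasing_by omega

-- hand port of str.zfill(16) on sign-free digit strings (exact there)
def pvZfill16 (l : List Char) : List Char := List.replicate (16 - l.length) '0' ++ l

-- hand port of Python's int(s, 2) on binary-digit strings (exact there)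
def pvIntOfBin (l : List Char) : Int := l.foldl (fun a c => 2 * a + (if c = '1' then 1 else 0)) 0

def pvALPHABET : PySem.Dict Int String := PySem.Dict.ofList
  [(0, " "), (1, ""), (2, ""), (3, ""), (4, ""), (5, ""), (6, "a"), (7, "b"), (8, "c"), (9, "d"),
   (10, "e"), (11, "f"), (12, "g"), (13, "h"), (14, "i"), (15, "j"), (16, "k"), (17, "l"),
   (18, "m"), (19, "n"), (20, "o"), (21, "p"), (22, "q"), (23, "r"), (24, "s"), (25, "t"),
   (26, "u"), (27, "v"), (28, "w"), (29, "x"), (30, "y"), (31, "z")]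

def pvSHIFT : PySem.Dict Int String := PySem.Dict.ofList
  [(0, " "), (1, ""), (2, ""), (3, ""), (4, ""), (5, ""), (6, ""), (7, ""), (8, "0"), (9, "1"),
   (10, "2"), (11, "3"), (12, "4"), (13, "5"), (14, "6"), (15, "7"), (16, "8"), (17, "9"),
   (18, "."), (19, ","), (20, "!"), (21, "?"), (22, "_"), (23, "#"), (24, "'"), (25, "\""),
   (26, "/"), (27, "\\"), (28, "-"), (29, ":"), (30, "("), (31, ")")]

-- decode_z_bytes_into_z_chars, over the chunk's character list
def pvDecodeZChars (zb : List Char) : List Char × List (List Char) :=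
  let br := pvZfill16 (pvBin (pvIntOfHexL zb).toNat)
  (PySem.List.slice br (some 0) (some 1),
   [PySem.List.slice br (some 1) (some 6), PySem.List.slice br (some 6) (some 11),
    PySem.List.slice br (some 11) (some 16)])

-- the while loop over word_binary_stream (KeyError impossible: 5-bit parses lie in 0..31,
-- so Dict lookups are ported with getD "")
def pvLoopA : Int → List (List Char) → String
  | _, [] => ""
  | shift, s :: rest =>
    let c := pvIntOfBin s
    if c = 4 ∨ c = 5 then pvLoopA c rest
    else
      if shift = 4 then PySem.Str.upper (PySem.Dict.getD pvALPHABET c "") ++ pvLoopA 0 rest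
      else if shift = 5 then
        if c = 6 then
          match rest with
          | a :: b :: rest' =>
              String.ofList [Char.ofNat (pvIntOfBin (a ++ b)).toNat] ++ pvLoopA 0 rest'
          | _ => ""  -- Python raises IndexError on word_binary_stream[i + 1]; outside Pre_
        else PySem.Dict.getD pvSHIFT c "" ++ pvLoopA 0 rest
      else PySem.Dict.getD pvALPHABET c "" ++ pvLoopA 0 rest
termination_by _ l => l.length
decreasing_by all_goals simp_wf <;> omega

def decode_z_word (z_bytes : String) : String :=
  let word := ""
  if PySem.Int.mod (PySem.Str.len z_bytes) 2 ≠ 0 then word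
  else
    -- `if is_end_byte is True: break` compares a str against True, so the break is dead code
    -- and the loop always consumes every chunk; is_end_byte is bound but unused.
    let stream := (PySem.List.pyRange 0 (PySem.Str.len z_bytes) 4).foldl
      (fun acc i =>
        acc ++ (pvDecodeZChars (PySem.List.slice z_bytes.toList (some i) (some (i + 4)))).2) []
    pvLoopA 0 stream

-- ===== PORT B =====

-- the per-code transition of B's state machine: state 0 plain, 4/5 pending shift,
-- 6 awaiting the ZSCII high bits, 7 awaiting the ZSCII low bits (pending holds the high bits)
def pvStepB : List Char × Int × Int → Int → List Char × Int × Int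
  | (out, state, pending), code =>
    if state = 6 then (out, 7, code)
    else if state = 7 then (out ++ [Char.ofNat (pending * 32 + code).toNat], 0, pending)
    else if code = 4 ∨ code = 5 then (out, code, pending)
    else if state = 5 ∧ code = 6 then (out, 6, pending)
    else if state = 5 then
      if code = 0 then (out ++ [' '], 0, pending)
      else if 18 ≤ code then
        (out ++ [PySem.List.pyGetD ".,!?_#'\"/\\-:()".toList (code - 18) ' '], 0, pending)
      else if 8 ≤ code then (out ++ [Char.ofNat (48 + code - 8).toNat], 0, pending)
      else (out, 0, pending)
    else if code = 0 then (out ++ [' '], 0, pending)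
    else if 6 ≤ code then
      let c := Char.ofNat (97 + code - 6).toNat
      (out ++ [if state = 4 then c.toUpper else c], 0, pending)
    else (out, 0, pending)

def decode_z_word_alt (z_bytes : String) : String :=
  if PySem.Int.mod (PySem.Str.len z_bytes) 2 ≠ 0 then ""
  else
    let r := (PySem.List.pyRange 0 (PySem.Str.len z_bytes) 4).foldl
      (fun acc i =>
        let w := pvIntOfHexL (PySem.List.slice z_bytes.toList (some i) (some (i + 4)))
        [PySem.Int.mod (PySem.Int.floordiv w 1024) 32,
         PySem.Int.mod (PySem.Int.floordiv w 32) 32,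
         PySem.Int.mod w 32].foldl pvStepB acc)
      ([], 0, 0)
    String.ofList r.1

-- ===== PRECONDITION & SPEC =====

def pvHexCh (c : Char) : Bool :=
  (48 ≤ c.toNat && c.toNat ≤ 57) || (97 ≤ c.toNat && c.toNat ≤ 102) || (65 ≤ c.toNat && c.toNat ≤ 70)

def pvPreVal (c : Char) : Nat :=
  if c.toNat ≤ 57 then c.toNat - 48 else if c.toNat ≤ 70 then c.toNat - 55 else c.toNat - 87

def pvPreW (l : List Char) : Nat := l.foldl (fun a c => 16 * a + pvPreVal c) 0

-- the stream of 5-bit z-character codes carried by the word (three per 16-bit chunk)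
def pvPreCodes : List Char → List Int
  | [] => []
  | c1 :: c2 :: c3 :: c4 :: rest =>
    (pvPreW [c1, c2, c3, c4] / 1024 % 32 : Nat) :: (pvPreW [c1, c2, c3, c4] / 32 % 32 : Nat) ::
      (pvPreW [c1, c2, c3, c4] % 32 : Nat) :: pvPreCodes rest
  | l => [(pvPreW l / 1024 % 32 : Nat), (pvPreW l / 32 % 32 : Nat), (pvPreW l % 32 : Nat)]

-- a shift-5/code-6 ZSCII escape must be followed by its two payload codes
def pvPreWF : Int → List Int → Bool
  | _, [] => true
  | sh, c :: rest =>
    if c = 4 || c = 5 then pvPreWF c rest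
    else if sh = 5 && c = 6 then
      match rest with
      | _ :: _ :: rest' => pvPreWF 0 rest'
      | _ => false
    else pvPreWF 0 rest

-- Pre_ admits odd-length inputs (A returns "" at once) and even-length words of plain hex
-- digits whose ZSCII escapes are complete; it excludes even-length inputs where int(..., 16)
-- raises ValueError or a truncated final escape makes A raise IndexError, and (see claim cites)
-- the exotic even-length chunks int(..., 16) still accepts (embedded whitespace / sign /
-- underscore), on which A and B agree but which a hex-digit word never contains.
def Pre_decode_z_word (z_bytes : String) : Prop :=
  ¬ z_bytes.toList.length % 2 = 0 ∨
    (z_bytes.toList.all pvHexCh = true ∧ pvPreWF 0 (pvPreCodes z_bytes.toList) = true)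
instance (z_bytes : String) : Decidable (Pre_decode_z_word z_bytes) := by
  unfold Pre_decode_z_word; infer_instance

def pvWitness_decode_z_word : String := "18E8"

def Spec_decode_z_word (z_bytes : String) (out : String) : Prop := out = decode_z_word_alt z_bytes
instance (z_bytes : String) (out : String) : Decidable (Spec_decode_z_word z_bytes out) := by
  unfold Spec_decode_z_word; infer_instance

-- ===== CLAIM (what is proved, stated in full; the proofs are below) =====
def Claim_equal_decode_z_word : Prop := ∀ (z_bytes : String), Dom_decode_z_word z_bytes →
  Pre_decode_z_word z_bytes → Spec_decode_z_word z_bytes (decode_z_word z_bytes)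

-- ===== LEMMAS AND PROOFS =====

-- fixed-width big-endian binary digits
def pvBinFix : Nat → Nat → List Char
  | 0, _ => []
  | k + 1, n => pvBinFix k (n / 2) ++ [if n % 2 = 1 then '1' else '0']

theorem length_pvBinFix (k n : Nat) : (pvBinFix k n).length = k := by
  induction k generalizing n with
  | zero => rfl
  | succ k ih => simp [pvBinFix, ih]

theorem pvBinFix_split (j m n : Nat) :
    pvBinFix (j + m) n = pvBinFix j (n / 2 ^ m) ++ pvBinFix m (n % 2 ^ m) := by
  induction m generalizing n with
  | zero => simp [pvBinFix]
  | succ m ih =>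
      have h1 : n / 2 / 2 ^ m = n / 2 ^ (m + 1) := by
        rw [Nat.div_div_eq_div_mul]; ring_nf
      have h2 : n % 2 ^ (m + 1) / 2 = n / 2 % 2 ^ m := by
        rw [pow_succ, Nat.mul_comm (2 ^ m) 2]
        exact Nat.mod_mul_right_div_self (m := n) (n := 2) (k := 2 ^ m)
      have h3 : n % 2 ^ (m + 1) % 2 = n % 2 := by
        apply Nat.mod_mod_of_dvd; exact ⟨2 ^ m, by ring⟩
      show pvBinFix (j + m) (n / 2) ++ _ = _
      rw [ih (n / 2), h1]
      show _ = pvBinFix j (n / 2 ^ (m+1)) ++ (pvBinFix m (n % 2 ^ (m+1) / 2) ++ [_])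
      rw [h2, h3, List.append_assoc]

theorem pvBinFix_zero (k : Nat) : pvBinFix k 0 = List.replicate k '0' := by
  induction k with
  | zero => rfl
  | succ k ih => rw [List.replicate_succ']; simp [pvBinFix, ih]

theorem length_pvBin_le (k n : Nat) (hk : 1 ≤ k) (h : n < 2 ^ k) : (pvBin n).length ≤ k := by
  induction k generalizing n with
  | zero => omega
  | succ k ih =>
      by_cases h2 : n < 2
      · rw [pvBin, if_pos h2]; simp
      · rw [pvBin, if_neg h2]
        have hk1 : 1 ≤ k := by
          rcases Nat.eq_zero_or_pos k with rfl | h' ; · norm_num at h; omega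
          · omega
        have hp : (2:Nat) ^ (k+1) = 2 ^ k * 2 := by rw [pow_succ]
        have := ih (n / 2) hk1 (by omega)
        simp only [List.length_append, List.length_cons, List.length_nil]
        omega

theorem pvBin_pad (k n : Nat) (hk : 1 ≤ k) (h : n < 2 ^ k) :
    List.replicate (k - (pvBin n).length) '0' ++ pvBin n = pvBinFix k n := by
  induction k generalizing n with
  | zero => omega
  | succ k ih =>
      by_cases h2 : n < 2
      · rw [pvBin, if_pos h2]
        have hfix : pvBinFix (k+1) n = List.replicate k '0' ++ [if n % 2 = 1 then '1' else '0'] := by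
          have : n / 2 = 0 := by omega
          rw [pvBinFix, this, pvBinFix_zero]
        rw [hfix]
        have : n % 2 = n := by omega
        rw [this]
        have : (if n = 1 then '1' else '0') = (if n % 2 = 1 then '1' else '0') := by
          have h01 : n = 0 ∨ n = 1 := by omega
          rcases h01 with rfl | rfl <;> simp
        simp [this]
      · have hk1 : 1 ≤ k := by
          rcases Nat.eq_zero_or_pos k with rfl | h' ; · norm_num at h; omega
          · omega
        have hp : (2:Nat) ^ (k+1) = 2 ^ k * 2 := by rw [pow_succ]
        have hlt : n / 2 < 2 ^ k := by omega
        have hlen := length_pvBin_le k (n / 2) hk1 hlt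
        rw [pvBin, if_neg h2]
        show List.replicate (k + 1 - ((pvBin (n/2) ++ _).length)) '0' ++ _ = pvBinFix (k+1) n
        rw [pvBinFix]
        rw [← ih (n / 2) hk1 hlt]
        simp only [List.length_append, List.length_cons, List.length_nil]
        have : k + 1 - ((pvBin (n/2)).length + (0 + 1)) = k - (pvBin (n/2)).length := by omega
        rw [this, ← List.append_assoc]

theorem pvIntOfBin_foldl_init (l : List Char) (x : Int) :
    List.foldl (fun a c => 2 * a + (if c = '1' then 1 else 0)) x l
      = x * 2 ^ l.length + pvIntOfBin l := by
  induction l generalizing x with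
  | nil => simp [pvIntOfBin]
  | cons c t ih =>
      have hc : pvIntOfBin (c :: t) = (if c = '1' then 1 else 0) * 2 ^ t.length + pvIntOfBin t := by
        rw [pvIntOfBin, List.foldl_cons, ih]; ring_nf
      simp only [List.foldl_cons, List.length_cons]
      rw [ih, hc]
      ring

theorem pvIntOfBin_append (a b : List Char) :
    pvIntOfBin (a ++ b) = pvIntOfBin a * 2 ^ b.length + pvIntOfBin b := by
  rw [pvIntOfBin, List.foldl_append, ← pvIntOfBin, pvIntOfBin_foldl_init]

theorem pvIntOfBin_binFix (k n : Nat) (h : n < 2 ^ k) : pvIntOfBin (pvBinFix k n) = n := by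
  induction k generalizing n with
  | zero => interval_cases n; rfl
  | succ k ih =>
      rw [pvBinFix, pvIntOfBin_append]
      have hp : (2:Nat) ^ (k+1) = 2 ^ k * 2 := by rw [pow_succ]
      rw [ih (n / 2) (by omega)]
      have hbit : pvIntOfBin [if n % 2 = 1 then '1' else '0'] = (n % 2 : Nat) := by
        have h01 : n % 2 = 0 ∨ n % 2 = 1 := by omega
        rcases h01 with h' | h' <;> rw [h'] <;> simp [pvIntOfBin]
      rw [hbit]
      simp only [List.length_cons, List.length_nil]
      push_cast
      omega

theorem pvIntOfBin_nonneg_lt (l : List Char) :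
    0 ≤ pvIntOfBin l ∧ pvIntOfBin l < 2 ^ l.length := by
  induction l with
  | nil => simp [pvIntOfBin]
  | cons c t ih =>
      have : pvIntOfBin (c :: t) = (if c = '1' then 1 else 0) * 2 ^ t.length + pvIntOfBin t := by
        rw [pvIntOfBin, List.foldl_cons, pvIntOfBin_foldl_init]; ring_nf
      rw [this]
      simp only [List.length_cons]
      have h2 : (0:Int) < 2 ^ t.length := by positivity
      have h3 : (2:Int) ^ (t.length + 1) = 2 ^ t.length * 2 := by rw [pow_succ]
      split_ifs <;> constructor <;> omega


theorem pvHexVal_eq (c : Char) (h : pvHexCh c = true) :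
    pvHexVal c = (pvPreVal c : Int) ∧ 0 ≤ pvHexVal c ∧ pvHexVal c < 16 := by
  simp only [pvHexCh, Bool.or_eq_true, Bool.and_eq_true, decide_eq_true_eq] at h
  unfold pvHexVal pvPreVal
  split_ifs <;> omega

theorem pvPreVal_le (c : Char) (h : pvHexCh c = true) : pvPreVal c ≤ 15 := by
  have := pvHexVal_eq c h
  omega

theorem pvPreW_eq (l : List Char) (h : ∀ c ∈ l, pvHexCh c = true) :
    pvIntOfHexL l = (pvPreW l : Int) := by
  suffices H : ∀ x : Nat, (∀ c ∈ l, pvHexCh c = true) →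
      List.foldl (fun a c => 16 * a + pvHexVal c) (x : Int) l
        = ((List.foldl (fun a c => 16 * a + pvPreVal c) x l : Nat) : Int) by
    have := H 0 h
    norm_num at this
    exact this
  induction l with
  | nil => intro x _; rfl
  | cons c t ih =>
      intro x hh
      have hc := pvHexVal_eq c (hh c (by simp))
      simp only [List.foldl_cons]
      have heq : 16 * (x : Int) + pvHexVal c = ((16 * x + pvPreVal c : Nat) : Int) := by
        push_cast
        omega
      rw [heq]
      have ht : ∀ d ∈ t, pvHexCh d = true := fun d hd => hh d (List.mem_cons_of_mem _ hd)
      exact ih ht (16 * x + pvPreVal c) ht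

theorem pvPreW_lt (l : List Char) (h : ∀ c ∈ l, pvHexCh c = true) : pvPreW l < 16 ^ l.length := by
  suffices H : ∀ x : Nat, (∀ c ∈ l, pvHexCh c = true) →
      List.foldl (fun a c => 16 * a + pvPreVal c) x l < (x + 1) * 16 ^ l.length by
    simpa using H 0 h
  induction l with
  | nil => intro x _; simp
  | cons c t ih =>
      intro x hh
      simp only [List.foldl_cons, List.length_cons]
      have hd := pvPreVal_le c (hh c (by simp))
      have hp : 0 < 16 ^ t.length := by positivity
      calc List.foldl (fun a c => 16 * a + pvPreVal c) (16 * x + pvPreVal c) t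
          < (16 * x + pvPreVal c + 1) * 16 ^ t.length :=
            (ih (fun d hd => hh d (List.mem_cons_of_mem _ hd)) _
              (fun d hd => hh d (List.mem_cons_of_mem _ hd)))
        _ ≤ ((x + 1) * 16) * 16 ^ t.length := Nat.mul_le_mul_right _ (by omega)
        _ = (x + 1) * 16 ^ (t.length + 1) := by rw [pow_succ]; ring


-- the three 5-bit slices of a chunk's padded binary representation parse back to the
-- arithmetically extracted code values
theorem pv_take_drop (A B C : List Char) (j m : Nat) (hA : A.length = j) (hB : B.length = m) :
    List.take m (List.drop j (A ++ (B ++ C))) = B := by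
  subst hA; rw [List.drop_left]; exact List.take_left' hB

theorem pvSlice_binFix_1 (wn : Nat) :
    PySem.List.slice (pvBinFix 16 wn) (some 1) (some 6) = pvBinFix 5 (wn / 2 ^ 10 % 2 ^ 5) := by
  rw [PySem.List.slice_toNat _ (by norm_num) (by norm_num)]
  show List.take 5 (List.drop 1 (pvBinFix 16 wn)) = _
  have e3 : wn % 2 ^ 15 / 2 ^ 10 = wn / 2 ^ 10 % 2 ^ 5 := by
    have := Nat.mod_mul_right_div_self (m := wn) (n := 2 ^ 10) (k := 2 ^ 5)
    norm_num at this ⊢; omega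
  rw [pvBinFix_split 1 15 wn, pvBinFix_split 5 10 (wn % 2 ^ 15), e3]
  exact pv_take_drop _ _ _ 1 5 (length_pvBinFix _ _) (length_pvBinFix _ _)

theorem pvSlice_binFix_2 (wn : Nat) :
    PySem.List.slice (pvBinFix 16 wn) (some 6) (some 11) = pvBinFix 5 (wn / 2 ^ 5 % 2 ^ 5) := by
  rw [PySem.List.slice_toNat _ (by norm_num) (by norm_num)]
  show List.take 5 (List.drop 6 (pvBinFix 16 wn)) = _
  have e3 : wn % 2 ^ 10 / 2 ^ 5 = wn / 2 ^ 5 % 2 ^ 5 := by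
    have := Nat.mod_mul_right_div_self (m := wn) (n := 2 ^ 5) (k := 2 ^ 5)
    norm_num at this ⊢; omega
  rw [pvBinFix_split 6 10 wn, pvBinFix_split 5 5 (wn % 2 ^ 10), e3]
  exact pv_take_drop _ _ _ 6 5 (length_pvBinFix _ _) (length_pvBinFix _ _)

theorem pvSlice_binFix_3 (wn : Nat) :
    PySem.List.slice (pvBinFix 16 wn) (some 11) (some 16) = pvBinFix 5 (wn % 2 ^ 5) := by
  rw [PySem.List.slice_toNat _ (by norm_num) (by norm_num)]
  show List.take 5 (List.drop 11 (pvBinFix 16 wn)) = _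
  rw [pvBinFix_split 11 5 wn, ← List.append_nil (pvBinFix 5 (wn % 2 ^ 5))]
  rw [pv_take_drop _ _ _ 11 5 (length_pvBinFix _ _) (length_pvBinFix _ _)]
  rw [List.append_nil]

theorem pvDecodeZChars_eq (zb : List Char) (hhex : ∀ c ∈ zb, pvHexCh c = true)
    (h4 : zb.length ≤ 4) :
    (pvDecodeZChars zb).2 = [pvBinFix 5 (pvPreW zb / 2 ^ 10 % 2 ^ 5),
      pvBinFix 5 (pvPreW zb / 2 ^ 5 % 2 ^ 5), pvBinFix 5 (pvPreW zb % 2 ^ 5)] := by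
  have hwlt : pvPreW zb < 65536 := by
    calc pvPreW zb < 16 ^ zb.length := pvPreW_lt zb hhex
      _ ≤ 16 ^ 4 := Nat.pow_le_pow_right (by norm_num) h4
      _ = 65536 := by norm_num
  have htn : (pvIntOfHexL zb).toNat = pvPreW zb := by
    rw [pvPreW_eq zb hhex]; exact Int.toNat_natCast _
  have hbr : pvZfill16 (pvBin (pvIntOfHexL zb).toNat) = pvBinFix 16 (pvPreW zb) := by
    rw [htn, pvZfill16]
    exact pvBin_pad 16 (pvPreW zb) (by norm_num) (by norm_num; omega)
  show [PySem.List.slice (pvZfill16 (pvBin (pvIntOfHexL zb).toNat)) (some 1) (some 6),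
        PySem.List.slice (pvZfill16 (pvBin (pvIntOfHexL zb).toNat)) (some 6) (some 11),
        PySem.List.slice (pvZfill16 (pvBin (pvIntOfHexL zb).toNat)) (some 11) (some 16)] = _
  rw [hbr, pvSlice_binFix_1, pvSlice_binFix_2, pvSlice_binFix_3]

-- generic 4-character chunking of the ported `for i in range(0, len, 4)` loops
def pvChunkFold {β : Type} (F : List Char → List β) : List Char → List β
  | [] => []
  | c1 :: c2 :: c3 :: c4 :: rest => F [c1, c2, c3, c4] ++ pvChunkFold F rest
  | l => F l

theorem pvRange4 (n : Nat) :
    PySem.List.pyRange 0 (n : Int) 4 = (List.range ((n + 3) / 4)).map (fun k => ((4 * k : Nat) : Int)) := by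
  rw [PySem.List.pyRange_of_pos 0 (n : Int) (by norm_num)]
  have hc : (if (0:Int) < n then (((n:Int) - 0 + 4 - 1) / 4).toNat else 0) = (n + 3) / 4 := by
    split_ifs with h
    · have : ((n:Int) - 0 + 4 - 1) = ((n + 3 : Nat) : Int) := by push_cast; ring
      rw [this, show ((4:Int)) = ((4:Nat):Int) from rfl, ← Int.natCast_div, Int.toNat_natCast]
    · have : n = 0 := by omega
      simp [this]
  rw [hc]
  apply List.map_congr_left
  intro k _
  push_cast; ring

theorem pvChunkFold_pyRange {β : Type} (F : List Char → List β) (l : List Char) :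
    (PySem.List.pyRange 0 (l.length : Int) 4).flatMap
      (fun i => F (PySem.List.slice l (some i) (some (i + 4)))) = pvChunkFold F l := by
  suffices H : ∀ (fuel : Nat) (l : List Char), l.length ≤ fuel →
      (PySem.List.pyRange 0 (l.length : Int) 4).flatMap
        (fun i => F (PySem.List.slice l (some i) (some (i + 4)))) = pvChunkFold F l from
    H l.length l le_rfl
  intro fuel
  induction fuel with
  | zero =>
      intro l hl
      have : l = [] := List.length_eq_zero_iff.mp (by omega)
      subst this
      rfl
  | succ fuel ih =>
      intro l hl
      match l with
      | [] => rfl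
      | [a] =>
          rw [pvRange4]
          norm_num [PySem.List.slice_toNat]
          rfl
      | [a, b] =>
          rw [pvRange4]
          norm_num [PySem.List.slice_toNat]
          rfl
      | [a, b, c] =>
          rw [pvRange4]
          norm_num [PySem.List.slice_toNat]
          rfl
      | c1 :: c2 :: c3 :: c4 :: rest =>
          have hn : (c1 :: c2 :: c3 :: c4 :: rest).length = rest.length + 4 := by simp
          rw [pvRange4, hn]
          have hm : (rest.length + 4 + 3) / 4 = (rest.length + 3) / 4 + 1 := by omega
          rw [hm, List.range_succ_eq_map]
          rw [List.map_cons, List.flatMap_cons, List.map_map]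
          have hhead : F (PySem.List.slice (c1 :: c2 :: c3 :: c4 :: rest)
              (some ((4 * 0 : Nat) : Int)) (some (((4 * 0 : Nat) : Int) + 4))) = F [c1, c2, c3, c4] := by
            rw [PySem.List.slice_toNat _ (by positivity) (by positivity)]
            rfl
          have htail : ∀ k : Nat, PySem.List.slice (c1 :: c2 :: c3 :: c4 :: rest)
              (some ((4 * (k + 1) : Nat) : Int)) (some (((4 * (k + 1) : Nat) : Int) + 4))
              = PySem.List.slice rest (some ((4 * k : Nat) : Int)) (some (((4 * k : Nat) : Int) + 4)) := by
            intro k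
            rw [show (((4 * (k + 1) : Nat) : Int)) = ((4 * k + 4 : Nat) : Int) by push_cast; ring]
            rw [show (((4 * k + 4 : Nat) : Int) + 4) = ((4 * k + 4 : Nat) : Int) + ((4:Nat) : Int) from by norm_num]
            rw [PySem.List.slice_natCast_add]
            rw [show (((4 * k : Nat) : Int) + 4) = ((4 * k : Nat) : Int) + ((4:Nat) : Int) from by norm_num]
            rw [PySem.List.slice_natCast_add]
            have hdrop : List.drop (4 * k + 4) (c1 :: c2 :: c3 :: c4 :: rest)
                = List.drop (4 * k) rest := by
              rw [Nat.add_comm (4 * k) 4, ← List.drop_drop]; rfl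
            rw [hdrop]
          have hrest := ih rest (by omega)
          rw [pvRange4] at hrest
          rw [show pvChunkFold F (c1 :: c2 :: c3 :: c4 :: rest)
              = F [c1, c2, c3, c4] ++ pvChunkFold F rest from rfl]
          rw [← hrest]
          rw [hhead]
          congr 1
          rw [List.flatMap_map, List.flatMap_map]
          apply List.flatMap_congr
          intro k _
          exact congrArg F (htail k)


-- ----- the two emission tables agree code by code -----

def pvEmitA (shift c : Int) : String :=
  if shift = 4 then PySem.Str.upper (PySem.Dict.getD pvALPHABET c "")
  else if shift = 5 then PySem.Dict.getD pvSHIFT c ""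
  else PySem.Dict.getD pvALPHABET c ""

def pvEmitB (state code : Int) : List Char :=
  if state = 5 then
    if code = 0 then [' ']
    else if 18 ≤ code then [PySem.List.pyGetD ".,!?_#'\"/\\-:()".toList (code - 18) ' ']
    else if 8 ≤ code then [Char.ofNat (48 + code - 8).toNat]
    else []
  else if code = 0 then [' ']
  else if 6 ≤ code then
    [if state = 4 then (Char.ofNat (97 + code - 6).toNat).toUpper else Char.ofNat (97 + code - 6).toNat]
  else []

theorem pvStepB_emit (out : List Char) (st p c : Int) (hst : st = 0 ∨ st = 4 ∨ st = 5)
    (h4 : ¬c = 4) (h5 : ¬c = 5) (h6 : ¬(st = 5 ∧ c = 6)) :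
    pvStepB (out, st, p) c = (out ++ pvEmitB st c, 0, p) := by
  rcases hst with rfl | rfl | rfl <;>
    simp only [pvStepB, pvEmitB] <;> split_ifs <;> simp_all

theorem pvEmitA_eq (st c : Int) (hst : st = 0 ∨ st = 4 ∨ st = 5) (hc0 : 0 ≤ c) (hc : c < 32)
    (h4 : ¬c = 4) (h5 : ¬c = 5) (h6 : ¬(st = 5 ∧ c = 6)) :
    (pvEmitA st c).toList = pvEmitB st c := by
  rcases hst with rfl | rfl | rfl <;> interval_cases c <;> rfl

theorem pvPreWF_cons (sh c : Int) (rest : List Int) :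
    pvPreWF sh (c :: rest) =
      (if c = 4 || c = 5 then pvPreWF c rest
       else if sh = 5 && c = 6 then
         (match rest with
          | _ :: _ :: r => pvPreWF 0 r
          | _ => false)
       else pvPreWF 0 rest) := by
  rcases rest with _ | ⟨a, _ | ⟨b, r⟩⟩
  · rw [pvPreWF.eq_3 sh c [] (by intro a b r h; cases h)]
  · rw [pvPreWF.eq_3 sh c [a] (by intro a' b r h; cases h)]
  · rw [pvPreWF.eq_2]

theorem pvLoopA_cons (x : Int) (s : List Char) (rest : List (List Char)) :
    pvLoopA x (s :: rest) =
      if pvIntOfBin s = 4 ∨ pvIntOfBin s = 5 then pvLoopA (pvIntOfBin s) rest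
      else if x = 4 then PySem.Str.upper (pvALPHABET.getD (pvIntOfBin s) "") ++ pvLoopA 0 rest
      else if x = 5 then
        (if pvIntOfBin s = 6 then
          (match rest with
           | a :: b :: rest' =>
               String.ofList [Char.ofNat (pvIntOfBin (a ++ b)).toNat] ++ pvLoopA 0 rest'
           | _ => "")
         else pvSHIFT.getD (pvIntOfBin s) "" ++ pvLoopA 0 rest)
      else pvALPHABET.getD (pvIntOfBin s) "" ++ pvLoopA 0 rest := by
  rcases rest with _ | ⟨a, _ | ⟨b, rest'⟩⟩
  · rw [pvLoopA.eq_3 x s [] (by intro a b r h; cases h)]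
  · rw [pvLoopA.eq_3 x s [a] (by intro a' b r h; cases h)]
  · rw [pvLoopA.eq_2]

theorem pvLoopA_emit (sh c : Int) (s : List Char) (rest : List (List Char))
    (hc : pvIntOfBin s = c) (h4 : ¬c = 4) (h5 : ¬c = 5) (h6 : ¬(sh = 5 ∧ c = 6)) :
    pvLoopA sh (s :: rest) = pvEmitA sh c ++ pvLoopA 0 rest := by
  rw [pvLoopA_cons]
  simp only [hc, pvEmitA]
  split_ifs <;> simp_all

-- ----- the single-pass state machine retraces A's while loop -----

theorem pvAut (fuel : Nat) : ∀ (ss : List (List Char)) (sh : Int) (out : List Char) (p : Int),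
    ss.length ≤ fuel → (∀ s ∈ ss, s.length = 5) → (sh = 0 ∨ sh = 4 ∨ sh = 5) →
    pvPreWF sh (ss.map pvIntOfBin) = true →
    (List.foldl pvStepB (out, sh, p) (ss.map pvIntOfBin)).1 = out ++ (pvLoopA sh ss).toList := by
  induction fuel with
  | zero =>
      intro ss sh out p hfuel _ _ _
      have : ss = [] := List.length_eq_zero_iff.mp (by omega)
      subst this
      simp [pvLoopA]
  | succ fuel ih =>
      intro ss sh out p hfuel hlen hsh hwf
      match ss with
      | [] => simp [pvLoopA]
      | s :: rest =>
          have hs5 : s.length = 5 := hlen s (by simp)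
          have hb := pvIntOfBin_nonneg_lt s
          rw [hs5] at hb
          set c := pvIntOfBin s with hcdef
          by_cases hc45 : c = 4 ∨ c = 5
          · -- shift codes
            have hstep : pvStepB (out, sh, p) c = (out, c, p) := by
              rcases hsh with rfl | rfl | rfl <;> simp only [pvStepB] <;>
                split_ifs <;> simp_all
            have hwf' : pvPreWF c (rest.map pvIntOfBin) = true := by
              have hbc : (c = 4 || c = 5) = true := by
                rcases hc45 with h | h <;> simp [h]
              rw [List.map_cons, ← hcdef, pvPreWF_cons, hbc] at hwf
              simpa using hwf
            have hloop : pvLoopA sh (s :: rest) = pvLoopA c rest := by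
              rw [pvLoopA_cons]
              simp only [← hcdef]
              rw [if_pos hc45]
            rw [List.map_cons, List.foldl_cons, ← hcdef, hstep, hloop]
            exact ih rest c out p (by simp at hfuel ⊢; omega)
              (fun t ht => hlen t (by simp [ht])) (by tauto) hwf'
          · rcases Decidable.em (sh = 5 ∧ c = 6) with hesc | hesc
            · -- ZSCII escape: the next two codes carry the character
              obtain ⟨rfl, hc6⟩ := hesc
              match rest with
              | [] =>
                  rw [List.map_cons, ← hcdef, pvPreWF_cons, hc6] at hwf
                  norm_num at hwf
              | [a] =>
                  rw [List.map_cons, ← hcdef, pvPreWF_cons, hc6] at hwf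
                  norm_num at hwf
              | a :: b :: rest' =>
                  have ha5 : a.length = 5 := hlen a (by simp)
                  have hb5 : b.length = 5 := hlen b (by simp)
                  have hwf' : pvPreWF 0 (rest'.map pvIntOfBin) = true := by
                    rw [List.map_cons, ← hcdef, pvPreWF_cons, hc6] at hwf
                    norm_num at hwf
                    simpa using hwf
                  have hchr : pvIntOfBin (a ++ b) = pvIntOfBin a * 32 + pvIntOfBin b := by
                    rw [pvIntOfBin_append, hb5]; norm_num
                  have hloop : pvLoopA 5 (s :: a :: b :: rest')
                      = String.ofList [Char.ofNat (pvIntOfBin (a ++ b)).toNat] ++ pvLoopA 0 rest' := by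
                    rw [pvLoopA_cons]
                    simp only [← hcdef, hc6]
                    rw [if_neg (by rw [hc6] at hc45; exact hc45)]
                    norm_num
                  have h1 : pvStepB (out, (5:Int), p) c = (out, 6, p) := by
                    rw [hc6]; simp only [pvStepB]; norm_num
                  have h2 : pvStepB (out, (6:Int), p) (pvIntOfBin a) = (out, 7, pvIntOfBin a) := by
                    simp only [pvStepB]; norm_num
                  have h3 : pvStepB (out, (7:Int), pvIntOfBin a) (pvIntOfBin b)
                      = (out ++ [Char.ofNat (pvIntOfBin a * 32 + pvIntOfBin b).toNat], 0, pvIntOfBin a) := by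
                    simp only [pvStepB]; norm_num
                  rw [List.map_cons, List.map_cons, List.map_cons, List.foldl_cons, ← hcdef, h1,
                      List.foldl_cons, h2, List.foldl_cons, h3, hloop]
                  rw [ih rest' 0 _ _ (by simp at hfuel ⊢; omega)
                    (fun t ht => hlen t (by simp [ht])) (by tauto) hwf']
                  simp [hchr, String.toList_append]
            · -- ordinary emission
              have h4 : ¬c = 4 := fun h => hc45 (Or.inl h)
              have h5 : ¬c = 5 := fun h => hc45 (Or.inr h)
              have hwf' : pvPreWF 0 (rest.map pvIntOfBin) = true := by
                have hb1 : (c = 4 || c = 5) = false := by simp [h4, h5]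
                have hb2 : (sh = 5 && c = 6) = false := by
                  rcases Decidable.em (sh = 5) with rfl5 | rfl5
                  · have : ¬c = 6 := fun h => hesc ⟨rfl5, h⟩
                    simp [this]
                  · simp [rfl5]
                rw [List.map_cons, ← hcdef, pvPreWF_cons, hb1, hb2] at hwf
                simpa using hwf
              rw [List.map_cons, List.foldl_cons, ← hcdef,
                  pvStepB_emit out sh p c hsh h4 h5 hesc,
                  pvLoopA_emit sh c s rest hcdef.symm h4 h5 hesc]
              rw [ih rest 0 _ _ (by simp at hfuel ⊢; omega)
                (fun t ht => hlen t (by simp [ht])) (by tauto) hwf']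
              rw [String.toList_append, pvEmitA_eq sh c hsh hb.1 (by simpa using hb.2) h4 h5 hesc]
              simp

-- ----- bridges between the three per-chunk code descriptions -----

def pvChunkCodes (zb : List Char) : List Int :=
  [((pvPreW zb / 1024 % 32 : Nat) : Int), ((pvPreW zb / 32 % 32 : Nat) : Int),
   ((pvPreW zb % 32 : Nat) : Int)]

def pvCodesB (zb : List Char) : List Int :=
  [PySem.Int.mod (PySem.Int.floordiv (pvIntOfHexL zb) 1024) 32,
   PySem.Int.mod (PySem.Int.floordiv (pvIntOfHexL zb) 32) 32,
   PySem.Int.mod (pvIntOfHexL zb) 32]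

theorem pvPreCodes_chunkFold (l : List Char) : pvPreCodes l = pvChunkFold pvChunkCodes l := by
  suffices H : ∀ (fuel : Nat) (l : List Char), l.length ≤ fuel →
      pvPreCodes l = pvChunkFold pvChunkCodes l from H l.length l le_rfl
  intro fuel
  induction fuel with
  | zero =>
      intro l hl
      have : l = [] := List.length_eq_zero_iff.mp (by omega)
      subst this; rfl
  | succ fuel ih =>
      intro l hl
      rcases l with _ | ⟨c1, _ | ⟨c2, _ | ⟨c3, _ | ⟨c4, rest⟩⟩⟩⟩
      · rfl
      · rfl
      · rfl
      · rfl
      · show pvPreCodes (c1 :: c2 :: c3 :: c4 :: rest)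
            = pvChunkCodes [c1, c2, c3, c4] ++ pvChunkFold pvChunkCodes rest
        rw [pvPreCodes, ← ih rest (by simp at hl; omega)]
        rfl

theorem pvCodesB_eq (zb : List Char) (hhex : ∀ c ∈ zb, pvHexCh c = true) :
    pvCodesB zb = pvChunkCodes zb := by
  have hw : pvIntOfHexL zb = ((pvPreW zb : Nat) : Int) := pvPreW_eq zb hhex
  have hd1 : PySem.Int.floordiv ((pvPreW zb : Nat) : Int) 1024 = ((pvPreW zb / 1024 : Nat) : Int) := by
    exact_mod_cast PySem.Int.floordiv_natCast (pvPreW zb) 1024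
  have hd2 : PySem.Int.floordiv ((pvPreW zb : Nat) : Int) 32 = ((pvPreW zb / 32 : Nat) : Int) := by
    exact_mod_cast PySem.Int.floordiv_natCast (pvPreW zb) 32
  have hm0 : PySem.Int.mod ((pvPreW zb : Nat) : Int) 32 = ((pvPreW zb % 32 : Nat) : Int) := by
    exact_mod_cast PySem.Int.mod_natCast (pvPreW zb) 32
  have hm1 : PySem.Int.mod ((pvPreW zb / 1024 : Nat) : Int) 32
      = ((pvPreW zb / 1024 % 32 : Nat) : Int) := by
    exact_mod_cast PySem.Int.mod_natCast (pvPreW zb / 1024) 32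
  have hm2 : PySem.Int.mod ((pvPreW zb / 32 : Nat) : Int) 32
      = ((pvPreW zb / 32 % 32 : Nat) : Int) := by
    exact_mod_cast PySem.Int.mod_natCast (pvPreW zb / 32) 32
  rw [pvCodesB, pvChunkCodes, hw, hd1, hd2, hm0, hm1, hm2]

theorem pvChunkFold_codesB (l : List Char) (hhex : ∀ c ∈ l, pvHexCh c = true) :
    pvChunkFold pvCodesB l = pvChunkFold pvChunkCodes l := by
  suffices H : ∀ (fuel : Nat) (l : List Char), l.length ≤ fuel → (∀ c ∈ l, pvHexCh c = true) →
      pvChunkFold pvCodesB l = pvChunkFold pvChunkCodes l from H l.length l le_rfl hhex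
  intro fuel
  induction fuel with
  | zero =>
      intro l hl _
      have : l = [] := List.length_eq_zero_iff.mp (by omega)
      subst this; rfl
  | succ fuel ih =>
      intro l hl hx
      rcases l with _ | ⟨c1, _ | ⟨c2, _ | ⟨c3, _ | ⟨c4, rest⟩⟩⟩⟩
      · rfl
      · exact pvCodesB_eq _ hx
      · exact pvCodesB_eq _ hx
      · exact pvCodesB_eq _ hx
      · show pvCodesB [c1, c2, c3, c4] ++ pvChunkFold pvCodesB rest
            = pvChunkCodes [c1, c2, c3, c4] ++ pvChunkFold pvChunkCodes rest
        rw [pvCodesB_eq _ (fun c hc => hx c (by simp at hc ⊢; tauto)),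
            ih rest (by simp at hl; omega) (fun c hc => hx c (by simp [hc]))]

theorem pvChunk_parse (zb : List Char) (hhex : ∀ c ∈ zb, pvHexCh c = true)
    (h4 : zb.length ≤ 4) :
    ((pvDecodeZChars zb).2).map pvIntOfBin = pvChunkCodes zb
      ∧ ∀ s ∈ (pvDecodeZChars zb).2, s.length = 5 := by
  have hlt : pvPreW zb < 2 ^ 16 := by
    calc pvPreW zb < 16 ^ zb.length := pvPreW_lt zb hhex
      _ ≤ 16 ^ 4 := Nat.pow_le_pow_right (by norm_num) h4
      _ = 2 ^ 16 := by norm_num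
  rw [pvDecodeZChars_eq zb hhex h4]
  constructor
  · have e1 : pvPreW zb / 2 ^ 10 % 2 ^ 5 < 2 ^ 5 := Nat.mod_lt _ (by norm_num)
    have e2 : pvPreW zb / 2 ^ 5 % 2 ^ 5 < 2 ^ 5 := Nat.mod_lt _ (by norm_num)
    have e3 : pvPreW zb % 2 ^ 5 < 2 ^ 5 := Nat.mod_lt _ (by norm_num)
    simp only [List.map_cons, List.map_nil,
      pvIntOfBin_binFix 5 _ e1, pvIntOfBin_binFix 5 _ e2, pvIntOfBin_binFix 5 _ e3]
    rw [pvChunkCodes]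
    norm_num
  · intro s hs
    simp only [List.mem_cons] at hs
    rcases hs with rfl | rfl | rfl | h
    · exact length_pvBinFix _ _
    · exact length_pvBinFix _ _
    · exact length_pvBinFix _ _
    · cases h

theorem pvChunkFold_parse (l : List Char) (hhex : ∀ c ∈ l, pvHexCh c = true) :
    (pvChunkFold (fun zb => (pvDecodeZChars zb).2) l).map pvIntOfBin
        = pvChunkFold pvChunkCodes l
      ∧ ∀ s ∈ pvChunkFold (fun zb => (pvDecodeZChars zb).2) l, s.length = 5 := by
  suffices H : ∀ (fuel : Nat) (l : List Char), l.length ≤ fuel → (∀ c ∈ l, pvHexCh c = true) →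
      (pvChunkFold (fun zb => (pvDecodeZChars zb).2) l).map pvIntOfBin
          = pvChunkFold pvChunkCodes l
        ∧ ∀ s ∈ pvChunkFold (fun zb => (pvDecodeZChars zb).2) l, s.length = 5 from
    H l.length l le_rfl hhex
  intro fuel
  induction fuel with
  | zero =>
      intro l hl _
      have : l = [] := List.length_eq_zero_iff.mp (by omega)
      subst this
      exact ⟨rfl, by intro s hs; cases hs⟩
  | succ fuel ih =>
      intro l hl hx
      rcases l with _ | ⟨c1, _ | ⟨c2, _ | ⟨c3, _ | ⟨c4, rest⟩⟩⟩⟩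
      · exact ⟨rfl, by intro s hs; cases hs⟩
      · exact pvChunk_parse _ hx (by simp)
      · exact pvChunk_parse _ hx (by simp)
      · exact pvChunk_parse _ hx (by simp)
      · have hxc : ∀ c ∈ [c1, c2, c3, c4], pvHexCh c = true := by
          intro c hc; exact hx c (by simp at hc ⊢; tauto)
        have hhead := pvChunk_parse [c1, c2, c3, c4] hxc (by simp)
        have htail := ih rest (by simp at hl; omega) (fun c hc => hx c (by simp [hc]))
        constructor
        · show ((pvDecodeZChars [c1, c2, c3, c4]).2
              ++ pvChunkFold (fun zb => (pvDecodeZChars zb).2) rest).map pvIntOfBin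
              = pvChunkCodes [c1, c2, c3, c4] ++ pvChunkFold pvChunkCodes rest
          rw [List.map_append, hhead.1, htail.1]
        · intro s hs
          rcases List.mem_append.mp hs with h | h
          · exact hhead.2 s h
          · exact htail.2 s h

-- ===== VERDICT (by name: the statement is the Claim_ definition above) =====
theorem decode_z_word_spec : Claim_equal_decode_z_word := by
  unfold Claim_equal_decode_z_word Spec_decode_z_word
  intro z _ hpre
  by_cases hpar : z.toList.length % 2 = 0
  · -- even length: run the full code stream through both machines
    rcases hpre with h1 | ⟨hhex, hwf⟩
    · exact absurd hpar h1
    have hhex' : ∀ c ∈ z.toList, pvHexCh c = true := by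
      intro c hc; exact List.all_eq_true.mp hhex c hc
    have hcond : ¬ PySem.Int.mod (PySem.Str.len z) 2 ≠ 0 := by
      rw [PySem.Str.len_eq, PySem.Int.mod_eq_emod_of_pos (by norm_num)]
      omega
    set ss := pvChunkFold (fun zb => (pvDecodeZChars zb).2) z.toList with hss
    have hparse := pvChunkFold_parse z.toList hhex'
    have hA : decode_z_word z = pvLoopA 0 ss := by
      unfold decode_z_word
      rw [if_neg hcond]
      show pvLoopA 0 ((PySem.List.pyRange 0 (PySem.Str.len z) 4).foldl
        (fun acc i => acc ++ (pvDecodeZChars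
          (PySem.List.slice z.toList (some i) (some (i + 4)))).2) []) = _
      rw [PySem.List.foldl_append_eq_flatMap, List.nil_append, PySem.Str.len_eq,
        pvChunkFold_pyRange (fun zb => (pvDecodeZChars zb).2) z.toList]
    have hB : decode_z_word_alt z
        = String.ofList ((List.foldl pvStepB ([], 0, 0) (pvChunkFold pvCodesB z.toList)).1) := by
      unfold decode_z_word_alt
      rw [if_neg hcond]
      show String.ofList ((List.foldl
        (fun acc i => List.foldl pvStepB acc
          (pvCodesB (PySem.List.slice z.toList (some i) (some (i + 4)))))
        ([], 0, 0) (PySem.List.pyRange 0 (PySem.Str.len z) 4)).1) = _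
      rw [← List.foldl_flatMap, PySem.Str.len_eq, pvChunkFold_pyRange pvCodesB z.toList]
    have hcodes : pvChunkFold pvCodesB z.toList = ss.map pvIntOfBin := by
      rw [pvChunkFold_codesB z.toList hhex', ← hparse.1]
    have hwf' : pvPreWF 0 (ss.map pvIntOfBin) = true := by
      rw [hparse.1, ← pvPreCodes_chunkFold]
      exact hwf
    have haut := pvAut ss.length ss 0 [] 0 le_rfl hparse.2 (Or.inl rfl) hwf'
    rw [hA, hB, hcodes, haut, List.nil_append, String.ofList_toList]
  · -- odd length: both return "" immediately
    have hcond : PySem.Int.mod (PySem.Str.len z) 2 ≠ 0 := by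
      rw [PySem.Str.len_eq, PySem.Int.mod_eq_emod_of_pos (by norm_num)]
      omega
    unfold decode_z_word decode_z_word_alt
    rw [if_pos hcond, if_pos hcond]
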